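-- pv_equiv track=rewrite | github.com/awellisz/BS-Poker | main.py | sevenok
-- ===== SOURCE A (Python) =====
-- from collections import Counter
--
-- def contains_all(a, b):
--     """
--     Utility function
--     Check if array A contains all elements of B, including with repeated values.
--     E.g. containsall([11, 4, 6], [4, 4]) -> False
--     E.g. containsall([11, 4, 6], [6, 11]) -> True
--     """
--     counter_a = Counter(a)
--     counter_b = Counter(b)
--     return all(v <= counter_a[k] for k, v in counter_b.items())
--
-- def sevenok(hand, c):
--     """
--     Return true if 7 of a kind of given card
--     """
--     if (len(hand) < 7):
--         return False
--
--     matches = [[c, c, c, c, 2, 2, 2], [c, c, c, 2, 2, 2, 2]]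
--     for match in matches:
--         if contains_all(hand, match):
--             return True
--     return False
-- ===== SOURCE B (Python) =====
-- def sevenok(hand, c):
--     """
--     Return true if 7 of a kind of given card
--     """
--     if len(hand) < 7:
--         return False
--     count_c = hand.count(c)
--     count_2 = hand.count(2)
--     if c == 2:
--         return count_2 >= 7
--     return (count_c >= 4 and count_2 >= 3) or (count_c >= 3 and count_2 >= 4)
-- ===== Notes on version B (the rewrite author's own statement) =====
-- stated objective: simpler
-- what changed: Replaced the Counter-based contains_all helper, the two explicit match-list constructions and the loop over them by two direct hand.count calls and a closed-form threshold test (collapsing both patterns, with the c==2 case folding into count_2 >= 7); avoiding the two Counter(hand) constructions gives a constant-factor speedup.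
import Mathlib
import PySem

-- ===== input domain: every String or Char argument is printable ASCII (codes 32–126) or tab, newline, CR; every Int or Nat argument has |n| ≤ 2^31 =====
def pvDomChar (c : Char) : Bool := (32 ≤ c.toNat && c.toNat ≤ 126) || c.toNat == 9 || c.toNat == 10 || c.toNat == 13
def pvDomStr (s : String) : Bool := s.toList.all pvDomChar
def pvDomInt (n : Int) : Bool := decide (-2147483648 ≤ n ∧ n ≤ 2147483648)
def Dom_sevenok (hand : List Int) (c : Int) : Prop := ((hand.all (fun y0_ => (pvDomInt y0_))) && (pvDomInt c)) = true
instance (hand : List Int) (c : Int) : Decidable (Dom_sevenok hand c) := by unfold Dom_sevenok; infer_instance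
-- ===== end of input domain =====

-- B replaces the Counter helper, match lists and loop by two direct counts and a closed-form test (simpler; same cost).

-- ===== PORT A =====
def contains_all (a b : List Int) : Bool :=
  let counter_a := PySem.Dict.counter a
  let counter_b := PySem.Dict.counter b
  counter_b.items.all (fun kv => decide (kv.2 ≤ counter_a.getD kv.1 0))

def sevenokLoop (hand : List Int) : List (List Int) → Bool
  | [] => false
  | m :: ms => if contains_all hand m then true else sevenokLoop hand ms

def sevenok (hand : List Int) (c : Int) : Bool :=
  if hand.length < 7 then false
  else sevenokLoop hand [[c, c, c, c, 2, 2, 2], [c, c, c, 2, 2, 2, 2]]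

-- ===== PORT B =====
def sevenok_alt (hand : List Int) (c : Int) : Bool :=
  if hand.length < 7 then false
  else
    let count_c := hand.count c
    let count_2 := hand.count 2
    if c = 2 then decide (7 ≤ count_2)
    else (decide (4 ≤ count_c) && decide (3 ≤ count_2)) ||
         (decide (3 ≤ count_c) && decide (4 ≤ count_2))

-- ===== PRECONDITION & SPEC =====
def Spec_sevenok (hand : List Int) (c : Int) (out : Bool) : Prop := out = sevenok_alt hand c
instance (hand : List Int) (c : Int) (out : Bool) : Decidable (Spec_sevenok hand c out) := by unfold Spec_sevenok; infer_instance

-- ===== CLAIM (what is proved, stated in full; the proofs are below) =====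
def Claim_equal_sevenok : Prop := ∀ (hand : List Int) (c : Int), Dom_sevenok hand c → Spec_sevenok hand c (sevenok hand c)

-- ===== LEMMAS AND PROOFS =====
-- contains_all a b holds iff every distinct value of b occurs in a at least as often as in b
theorem contains_all_eq (a b : List Int) :
    contains_all a b = (PySem.Set.ofList b).all (fun k => decide (b.count k ≤ a.count k)) := by
  simp [contains_all, PySem.Dict.items_counter, PySem.Dict.getD_counter, List.all_map,
        Function.comp_def, Nat.cast_le]

theorem sevenok_spec_aux (hand : List Int) (c : Int) :
    sevenok hand c = sevenok_alt hand c := by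
  by_cases hc : c = 2
  · subst hc
    simp only [sevenok, sevenok_alt, sevenokLoop, contains_all_eq]
    by_cases hl : hand.length < 7 <;>
      simp [hl, PySem.Set.ofList, PySem.Set.add, List.count_cons]
  · simp only [sevenok, sevenok_alt, sevenokLoop, contains_all_eq]
    by_cases hl : hand.length < 7 <;>
      simp [hl, hc, Ne.symm hc, PySem.Set.ofList, PySem.Set.add, PySem.Set.contains,
        List.count_cons]

-- ===== VERDICT (by name: the statement is the Claim_ definition above) =====
theorem sevenok_spec : Claim_equal_sevenok := by
  intro hand c _
  exact sevenok_spec_aux hand c
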